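-- pv_equiv track=rewrite | github.com/rivergillis/aoc | 2023/three/two.py | get_whole_number
-- ===== SOURCE A (Python) =====
-- def get_whole_number(s,start_i):
--   if not s[start_i].isdigit():
--     return None
--
--   i = start_i
--   # go left
--   while i >= 1 and s[i-1].isdigit():
--     i -= 1
--   left_i = i
--
--   # go forward and capture number
--   digits = []
--   while i < len(s) and s[i].isdigit():
--     digits.append(s[i])
--     i += 1
--
--   return int(''.join(digits)), left_i
-- ===== SOURCE B (Python) =====
-- import re
--
-- def get_whole_number(s, start_i):
--     n = len(s)
--     if start_i < 0:
--         start_i += n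
--     if not 0 <= start_i < n:
--         raise IndexError("string index out of range")
--     if not s[start_i].isdigit():
--         return None
--     for m in re.finditer(r"\d+", s):
--         if m.start() <= start_i < m.end():
--             return int(m.group()), m.start()
-- ===== Notes on version B (the rewrite author's own statement) =====
-- stated objective: idiomatic
-- what changed: B replaces A's two index-walking while loops (left scan then right capture) with a single left-to-right enumeration of maximal digit runs (re.finditer), returning the run whose span contains the queried index, after normalising a negative index the Python way.
-- intended difference: On a negative in-range start_i pointing at a digit, A wraps only the initial lookup and then walks raw negative indices, returning a number stitched together across the string end (e.g. ('12',-1) gives (212, -1)); B normalises the negative index and returns the actual number containing that character ((12, 0)), which is the intended value. — e.g. on get_whole_number("12", -1): A returns some (212, -1), B returns some (12, 0)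
import Mathlib
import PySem

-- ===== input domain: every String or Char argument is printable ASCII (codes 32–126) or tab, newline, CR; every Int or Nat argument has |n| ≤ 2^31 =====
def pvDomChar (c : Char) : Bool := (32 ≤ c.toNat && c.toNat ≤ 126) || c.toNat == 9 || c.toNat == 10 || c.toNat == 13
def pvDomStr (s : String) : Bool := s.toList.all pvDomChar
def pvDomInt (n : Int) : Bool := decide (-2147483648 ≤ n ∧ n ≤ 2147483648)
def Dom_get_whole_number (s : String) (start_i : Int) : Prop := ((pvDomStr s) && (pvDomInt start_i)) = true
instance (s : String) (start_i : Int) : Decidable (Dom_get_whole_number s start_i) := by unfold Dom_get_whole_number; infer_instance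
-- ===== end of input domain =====

-- B enumerates maximal digit runs left to right and returns the run whose span contains the
-- (negative-normalised) index, instead of A's two index-walking while loops; same O(n) cost.

-- int(x) where x is a nonempty all-digit run (the only way both Pythons call int here):
-- ported exactly as the base-10 fold over the digits
def pvIntVal (ds : List Char) : Int :=
  ds.foldl (fun a c => a * 10 + ((c.toNat : Int) - 48)) 0

-- ===== PORT A =====
-- while i >= 1 and s[i-1].isdigit(): i -= 1
def pvLeftA (cs : List Char) (i : Int) : Int :=
  if _h : 1 ≤ i then
    match PySem.List.pyGet? cs (i - 1) with
    | some c => if PySem.Chars.isdigit c then pvLeftA cs (i - 1) else i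
    | none => i
  else i
termination_by i.toNat
decreasing_by omega

-- while i < len(s) and s[i].isdigit(): digits.append(s[i]); i += 1
def pvFwdA (cs : List Char) (i : Int) (acc : List Char) : List Char :=
  if _h : i < (cs.length : Int) then
    match PySem.List.pyGet? cs i with
    | some c => if PySem.Chars.isdigit c then pvFwdA cs (i + 1) (acc ++ [c]) else acc
    | none => acc
  else acc
termination_by ((cs.length : Int) - i).toNat
decreasing_by omega

def get_whole_number (s : String) (start_i : Int) : Option (Int × Int) :=
  match PySem.Str.pyGet? s start_i with
  | none => none            -- s[start_i] raises IndexError: excluded by Pre_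
  | some c =>
    if PySem.Chars.isdigit c then
      some (pvIntVal (pvFwdA s.toList (pvLeftA s.toList start_i) []), pvLeftA s.toList start_i)
    else none

-- ===== PORT B =====
-- normalise a negative index, raise IndexError out of range, then
-- for m in re.finditer(r'\d+', s): if m.start() <= start_i < m.end(): return int(m.group()), m.start()
def pvScanB (cs : List Char) (pos : Int) (k : Int) : Option (Int × Int) :=
  match cs with
  | [] => none
  | c :: rest =>
    if PySem.Chars.isdigit c then
      if pos ≤ k ∧ k < pos + ((c :: rest.takeWhile PySem.Chars.isdigit).length : Int) then
        some (pvIntVal (c :: rest.takeWhile PySem.Chars.isdigit), pos)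
      else pvScanB (rest.dropWhile PySem.Chars.isdigit)
             (pos + ((c :: rest.takeWhile PySem.Chars.isdigit).length : Int)) k
    else pvScanB rest (pos + 1) k
termination_by cs.length
decreasing_by
  · exact Nat.lt_succ_of_le (List.length_dropWhile_le _ _)
  · exact Nat.lt_succ_self _

def get_whole_number_alt (s : String) (start_i : Int) : Option (Int × Int) :=
  let k := if start_i < 0 then start_i + (s.toList.length : Int) else start_i
  if 0 ≤ k ∧ k < (s.toList.length : Int) then
    if ¬ PySem.Chars.isdigit (s.toList.getD k.toNat ' ') = true then none
    else pvScanB s.toList 0 k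
  else none            -- raise IndexError: excluded by Pre_

-- ===== PRECONDITION & SPEC =====
-- Pre_ excludes exactly the inputs where A raises IndexError at s[start_i] (index out of range).
def Pre_get_whole_number (s : String) (start_i : Int) : Prop :=
  -(s.toList.length : Int) ≤ start_i ∧ start_i < (s.toList.length : Int)
instance (s : String) (start_i : Int) : Decidable (Pre_get_whole_number s start_i) := by
  unfold Pre_get_whole_number; infer_instance

def pvWitness_get_whole_number : String × Int := ("a12b", 2)

-- On a negative in-range start_i pointing at a digit, A walks raw negative indices and returns a
-- number stitched across the string end with a negative position; B normalises the index and
-- returns the actual number containing that character, which is the intended value.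
def D_get_whole_number (s : String) (start_i : Int) : Prop :=
  start_i < 0 ∧ 0 ≤ start_i + (s.toList.length : Int) ∧
    (s.toList[(start_i + (s.toList.length : Int)).toNat]?.any
      (fun c => decide ('0' ≤ c ∧ c ≤ '9'))) = true
instance (s : String) (start_i : Int) : Decidable (D_get_whole_number s start_i) := by
  unfold D_get_whole_number; infer_instance

def Spec_get_whole_number (s : String) (start_i : Int) (out : Option (Int × Int)) : Prop :=
  ¬ D_get_whole_number s start_i → out = get_whole_number_alt s start_i
instance (s : String) (start_i : Int) (out : Option (Int × Int)) : Decidable (Spec_get_whole_number s start_i out) := by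
  unfold Spec_get_whole_number; infer_instance

def pvDiffWitness_get_whole_number : String × Int := ("12", -1)
def pvDiffWitnessOut_get_whole_number : (Option (Int × Int)) × (Option (Int × Int)) :=
  (some (212, -1), some (12, 0))

-- ===== CLAIM (what is proved, stated in full; the proofs are below) =====
def Claim_unchanged_get_whole_number : Prop := ∀ (s : String) (start_i : Int), Dom_get_whole_number s start_i → Pre_get_whole_number s start_i → Spec_get_whole_number s start_i (get_whole_number s start_i)
def Claim_changed_get_whole_number : Prop := Dom_get_whole_number (pvDiffWitness_get_whole_number.1) (pvDiffWitness_get_whole_number.2) ∧ Pre_get_whole_number (pvDiffWitness_get_whole_number.1) (pvDiffWitness_get_whole_number.2) ∧ D_get_whole_number (pvDiffWitness_get_whole_number.1) (pvDiffWitness_get_whole_number.2) ∧ get_whole_number (pvDiffWitness_get_whole_number.1) (pvDiffWitness_get_whole_number.2) = pvDiffWitnessOut_get_whole_number.1 ∧ get_whole_number_alt (pvDiffWitness_get_whole_number.1) (pvDiffWitness_get_whole_number.2) = pvDiffWitnessOut_get_whole_number.2 ∧ pvDiffWitnessOut_get_whole_number.1 ≠ pvDiffWitnessOut_get_whole_n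umber.2
def Claim_exact_get_whole_number : Prop := ∀ (s : String) (start_i : Int), Dom_get_whole_number s start_i → Pre_get_whole_number s start_i → D_get_whole_number s start_i → get_whole_number s start_i ≠ get_whole_number_alt s start_i

-- ===== LEMMAS AND PROOFS =====


-- left boundary of the digit run through position j (0 if everything left of j is digits)
def pvLeftB (cs : List Char) : Nat → Nat
  | 0 => 0
  | j + 1 => if PySem.Chars.isdigit (cs.getD j ' ') = true then pvLeftB cs j else j + 1

def pvRunOf (cs : List Char) (j : Nat) : List Char :=
  (cs.drop (pvLeftB cs j)).takeWhile PySem.Chars.isdigit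

-- D_'s digit test (a plain character-range check on the input) agrees with the ports' isdigit
theorem pvD_digit_bridge (l : List Char) (n : Nat) (hn : n < l.length) :
    (l[n]?.any (fun c => decide ('0' ≤ c ∧ c ≤ '9')))
      = PySem.Chars.isdigit (l.getD n ' ') := by
  rw [List.getElem?_eq_getElem hn, List.getD_eq_getElem (hn := hn)]
  simp [PySem.Chars.isdigit, Option.any]

-- dropWhile is drop of the takeWhile length
theorem pvDW (p : Char → Bool) (l : List Char) :
    l.dropWhile p = l.drop (l.takeWhile p).length := by
  induction l with
  | nil => rfl
  | cons a l ih =>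
    by_cases h : p a = true
    · simp [List.takeWhile_cons, h, ih]
    · simp [List.takeWhile_cons, h]

-- characters inside the takeWhile prefix satisfy the predicate
theorem pvTW_getD (p : Char → Bool) :
    ∀ (l : List Char) (i : Nat), i < (l.takeWhile p).length → p (l.getD i ' ') = true := by
  intro l
  induction l with
  | nil => intro i hi; simp at hi
  | cons a l ih =>
    intro i hi
    by_cases h : p a = true
    · cases i with
      | zero => simpa using h
      | succ i =>
        rw [List.getD_cons_succ]
        apply ih
        simp [List.takeWhile_cons, h] at hi
        omega
    · simp [List.takeWhile_cons, h] at hi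
  -- the character right after the takeWhile prefix fails the predicate

theorem pvTW_boundary (p : Char → Bool) :
    ∀ (l : List Char), (l.takeWhile p).length < l.length →
      p (l.getD (l.takeWhile p).length ' ') = false := by
  intro l
  induction l with
  | nil => intro h; simp at h
  | cons a l ih =>
    intro h
    by_cases hp : p a = true
    · simp only [List.takeWhile_cons, hp, if_true, List.length_cons] at h ⊢
      rw [List.getD_cons_succ]
      exact ih (by omega)
    · have hp' : p a = false := by simpa using hp
      simp [List.takeWhile_cons, hp', List.getD_cons_zero]

theorem pvLeftB_succ_def (cs : List Char) (j : Nat) :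
    pvLeftB cs (j + 1) =
      if PySem.Chars.isdigit (cs.getD j ' ') = true then pvLeftB cs j else j + 1 := rfl

theorem pvLeftB_zero_of_digits (cs : List Char) (j : Nat)
    (h : ∀ i ≤ j, PySem.Chars.isdigit (cs.getD i ' ') = true) : pvLeftB cs j = 0 := by
  induction j with
  | zero => rfl
  | succ j ih =>
    rw [pvLeftB_succ_def, if_pos (h j (by omega))]
    exact ih (fun i hi => h i (by omega))

theorem pvLeftB_shift (cs : List Char) (L : Nat)
    (hL : PySem.Chars.isdigit (cs.getD L ' ') = false) :
    ∀ j, 1 ≤ j → pvLeftB cs (L + j) = L + pvLeftB (cs.drop L) j := by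
  intro j
  induction j with
  | zero => omega
  | succ j ih =>
    intro _
    have hg : ∀ m, (cs.drop L).getD m ' ' = cs.getD (L + m) ' ' := by
      intro m; simp [List.getD_eq_getElem?_getD, List.getElem?_drop]
    by_cases hj : 1 ≤ j
    · rw [show L + (j + 1) = (L + j) + 1 by omega, pvLeftB_succ_def, pvLeftB_succ_def,
        hg j, ih hj]
      split <;> omega
    · have hj0 : j = 0 := by omega
      subst hj0
      have hg0 : (cs.drop L).getD 0 ' ' = cs.getD L ' ' := by simpa using hg 0
      rw [pvLeftB_succ_def, pvLeftB_succ_def, hg0, hL]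
      simp only [Bool.false_eq_true, if_false, pvLeftB]

theorem pvLeftB_cons (c : Char) (rest : List Char)
    (hc : PySem.Chars.isdigit c = false) :
    ∀ j, pvLeftB (c :: rest) (j + 1) = pvLeftB rest j + 1 := by
  intro j
  induction j with
  | zero => rw [pvLeftB_succ_def]; simp [hc, pvLeftB]
  | succ j ih =>
    rw [pvLeftB_succ_def, List.getD_cons_succ, pvLeftB_succ_def (cs := rest), ih]
    split <;> omega

-- master characterisation of B's scan
theorem pvScanB_eq_aux : ∀ (N : ℕ) (cs : List Char), cs.length ≤ N → ∀ (pos k : Int),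
    pvScanB cs pos k =
      if pos ≤ k ∧ (k - pos).toNat < cs.length ∧
          PySem.Chars.isdigit (cs.getD (k - pos).toNat ' ') = true then
        some (pvIntVal (pvRunOf cs (k - pos).toNat), pos + (pvLeftB cs (k - pos).toNat : Int))
      else none := by
  intro N
  induction N with
  | zero =>
    intro cs hlen pos k
    have h0 : cs = [] := List.eq_nil_of_length_eq_zero (by omega)
    subst h0
    simp [pvScanB]
  | succ N ih =>
    intro cs hlen pos k
    match cs with
    | [] => simp [pvScanB]
    | c :: rest =>
      rw [pvScanB]
      have htl : (rest.takeWhile PySem.Chars.isdigit).length ≤ rest.length := by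
        simpa using List.Sublist.length_le (List.takeWhile_sublist _)
      by_cases hc : PySem.Chars.isdigit c = true
      · rw [if_pos hc]
        set t := rest.takeWhile PySem.Chars.isdigit with ht
        have hclen : ((c :: t).length : Int) = (t.length : Int) + 1 := by simp
        by_cases hin : pos ≤ k ∧ k < pos + ((c :: t).length : Int)
        · rw [if_pos hin]
          obtain ⟨h1, h2⟩ := hin
          rw [hclen] at h2
          have hj : (k - pos).toNat ≤ t.length := by omega
          have hdigits : ∀ i ≤ (k - pos).toNat,
              PySem.Chars.isdigit ((c :: rest).getD i ' ') = true := by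
            intro i hi
            cases i with
            | zero => simpa using hc
            | succ i' =>
              rw [List.getD_cons_succ]
              have hi' : i' < t.length := by omega
              rw [ht] at hi'
              exact pvTW_getD _ rest i' hi'
          rw [if_pos ⟨h1, by simp; omega, hdigits _ le_rfl⟩]
          have hlb : pvLeftB (c :: rest) (k - pos).toNat = 0 :=
            pvLeftB_zero_of_digits _ _ hdigits
          have hrun : pvRunOf (c :: rest) (k - pos).toNat = c :: t := by
            unfold pvRunOf
            rw [hlb]
            simp [List.takeWhile_cons, hc, ht]
          rw [hrun, hlb]
          simp
        · rw [if_neg hin]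
          rw [ih (rest.dropWhile PySem.Chars.isdigit)
            (le_trans (List.length_dropWhile_le _ _) (by simpa using hlen)) _ k]
          have hdw : rest.dropWhile PySem.Chars.isdigit = rest.drop t.length := by
            rw [pvDW]
          by_cases hk : pos ≤ k
          · have hkL : pos + ((t.length : Int) + 1) ≤ k := by
              rw [hclen] at hin; omega
            have hjj : (k - pos).toNat = (t.length + 1) + (k - (pos + ((c :: t).length : Int))).toNat := by
              rw [hclen]; omega
            set j' := (k - (pos + ((c :: t).length : Int))).toNat with hj'
            have hgd : (rest.dropWhile PySem.Chars.isdigit).getD j' ' '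
                = (c :: rest).getD (k - pos).toNat ' ' := by
              rw [hdw, hjj, show (t.length + 1) + j' = (t.length + j') + 1 by omega,
                List.getD_cons_succ]
              simp [List.getD_eq_getElem?_getD, List.getElem?_drop]
            have hlen' : (rest.dropWhile PySem.Chars.isdigit).length = rest.length - t.length := by
              rw [hdw, List.length_drop]
            have hanchor : PySem.Chars.isdigit ((c :: rest).getD (t.length + 1) ' ') = false := by
              rw [List.getD_cons_succ]
              by_cases hlt : t.length < rest.length
              · exact pvTW_boundary _ rest (by rw [← ht]; exact hlt)
              · have hnone : rest.getD t.length ' ' = ' ' := by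
                  simp [List.getD_eq_getElem?_getD, List.getElem?_eq_none (by omega : rest.length ≤ t.length)]
                rw [hnone]; decide
            have hciff : (pos + ((c :: t).length : Int) ≤ k ∧ j' < (rest.dropWhile PySem.Chars.isdigit).length ∧
                PySem.Chars.isdigit ((rest.dropWhile PySem.Chars.isdigit).getD j' ' ') = true)
                ↔ (pos ≤ k ∧ (k - pos).toNat < (c :: rest).length ∧
                PySem.Chars.isdigit ((c :: rest).getD (k - pos).toNat ' ') = true) := by
              rw [hgd, hlen']
              constructor
              · rintro ⟨_, hl, hd⟩
                exact ⟨hk, by simp; omega, hd⟩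
              · rintro ⟨_, hl, hd⟩
                refine ⟨by rw [hclen]; omega, ?_, hd⟩
                simp at hl; omega
            by_cases hC : pos ≤ k ∧ (k - pos).toNat < (c :: rest).length ∧
                PySem.Chars.isdigit ((c :: rest).getD (k - pos).toNat ' ') = true
            · rw [if_pos (hciff.mpr hC), if_pos hC]
              -- j' ≥ 1
              have hj1 : 1 ≤ j' := by
                by_contra hj0
                have hz : j' = 0 := by omega
                have hd := hC.2.2
                rw [hjj, hz, Nat.add_zero] at hd
                rw [hd] at hanchor
                simp at hanchor
              have hdropcs : (c :: rest).drop (t.length + 1) = rest.dropWhile PySem.Chars.isdigit := by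
                rw [hdw]; rfl
              have hlb : pvLeftB (c :: rest) (k - pos).toNat
                  = (t.length + 1) + pvLeftB (rest.dropWhile PySem.Chars.isdigit) j' := by
                rw [hjj, pvLeftB_shift _ _ hanchor j' hj1, hdropcs]
              have hrun : pvRunOf (c :: rest) (k - pos).toNat
                  = pvRunOf (rest.dropWhile PySem.Chars.isdigit) j' := by
                unfold pvRunOf
                rw [hlb, ← hdropcs, ← List.drop_drop]
              rw [hrun, hlb]
              have hpos : pos + (((t.length + 1) + pvLeftB (rest.dropWhile PySem.Chars.isdigit) j' : ℕ) : Int)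
                  = pos + ((c :: t).length : Int) + (pvLeftB (rest.dropWhile PySem.Chars.isdigit) j' : Int) := by
                rw [hclen]; push_cast; ring
              rw [hpos]
            · rw [if_neg (fun h => hC (hciff.mp h)), if_neg hC]
          · rw [if_neg (by rw [hclen]; rintro ⟨h1, -⟩; omega),
              if_neg (by rintro ⟨h1, -⟩; exact hk h1)]
      · rw [if_neg hc]
        have hcf : PySem.Chars.isdigit c = false := by simpa using hc
        rw [ih rest (by simpa using hlen) _ k]
        by_cases hk1 : pos + 1 ≤ k
        · have hjj : (k - pos).toNat = (k - (pos + 1)).toNat + 1 := by omega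
          set j' := (k - (pos + 1)).toNat with hj'
          have hgd : rest.getD j' ' ' = (c :: rest).getD (k - pos).toNat ' ' := by
            rw [hjj, List.getD_cons_succ]
          have hciff : (pos + 1 ≤ k ∧ j' < rest.length ∧
              PySem.Chars.isdigit (rest.getD j' ' ') = true)
              ↔ (pos ≤ k ∧ (k - pos).toNat < (c :: rest).length ∧
              PySem.Chars.isdigit ((c :: rest).getD (k - pos).toNat ' ') = true) := by
            rw [hgd]
            constructor
            · rintro ⟨-, hl, hd⟩
              exact ⟨by omega, by simp; omega, hd⟩
            · rintro ⟨-, hl, hd⟩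
              refine ⟨hk1, ?_, hd⟩
              simp at hl; omega
          by_cases hC : pos ≤ k ∧ (k - pos).toNat < (c :: rest).length ∧
              PySem.Chars.isdigit ((c :: rest).getD (k - pos).toNat ' ') = true
          · rw [if_pos (hciff.mpr hC), if_pos hC]
            have hlb : pvLeftB (c :: rest) (k - pos).toNat = pvLeftB rest j' + 1 := by
              rw [hjj]; exact pvLeftB_cons c rest hcf j'
            have hrun : pvRunOf (c :: rest) (k - pos).toNat = pvRunOf rest j' := by
              unfold pvRunOf
              rw [hlb, List.drop_succ_cons]
            rw [hrun, hlb]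
            have hpos : pos + ((pvLeftB rest j' + 1 : ℕ) : Int)
                = pos + 1 + (pvLeftB rest j' : Int) := by push_cast; ring
            rw [hpos]
          · rw [if_neg (fun h => hC (hciff.mp h)), if_neg hC]
        · by_cases hk0 : pos ≤ k
          · have hj0 : (k - pos).toNat = 0 := by omega
            rw [if_neg (by rintro ⟨h1, -⟩; exact hk1 h1),
              if_neg (by rintro ⟨-, -, hd⟩; rw [hj0] at hd; simp at hd; rw [hd] at hcf; simp at hcf)]
          · rw [if_neg (by rintro ⟨h1, -⟩; omega), if_neg (by rintro ⟨h1, -⟩; exact hk0 h1)]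

theorem pvScanB_eq (cs : List Char) (pos k : Int) :
    pvScanB cs pos k =
      if pos ≤ k ∧ (k - pos).toNat < cs.length ∧
          PySem.Chars.isdigit (cs.getD (k - pos).toNat ' ') = true then
        some (pvIntVal (pvRunOf cs (k - pos).toNat), pos + (pvLeftB cs (k - pos).toNat : Int))
      else none :=
  pvScanB_eq_aux cs.length cs le_rfl pos k

theorem pvLeftA_eq (cs : List Char) : ∀ (i : Int), 0 ≤ i → i < (cs.length : Int) →
    pvLeftA cs i = (pvLeftB cs i.toNat : Int) := by
  intro i
  induction i using pvLeftA.induct cs with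
  | case1 i h1 c hg hd ih =>
    intro h0 hlt
    rw [pvLeftA, dif_pos h1, hg]
    show (if PySem.Chars.isdigit c = true then pvLeftA cs (i - 1) else i) = _
    rw [if_pos hd, ih (by omega) (by omega)]
    have hjj : i.toNat = (i - 1).toNat + 1 := by omega
    have hgd : cs.getD (i - 1).toNat ' ' = c := by
      have := PySem.List.pyGet?_eq_some_getElem (xs := cs) (i := i - 1) (by omega) (by omega)
      rw [hg] at this
      rw [List.getD_eq_getElem (hn := by omega)]
      exact (Option.some_inj.mp this).symm
    rw [hjj, pvLeftB_succ_def, hgd, if_pos hd]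
  | case2 i h1 c hg hd =>
    intro h0 hlt
    rw [pvLeftA, dif_pos h1, hg]
    show (if PySem.Chars.isdigit c = true then pvLeftA cs (i - 1) else i) = _
    rw [if_neg hd]
    have hjj : i.toNat = (i - 1).toNat + 1 := by omega
    have hgd : cs.getD (i - 1).toNat ' ' = c := by
      have := PySem.List.pyGet?_eq_some_getElem (xs := cs) (i := i - 1) (by omega) (by omega)
      rw [hg] at this
      rw [List.getD_eq_getElem (hn := by omega)]
      exact (Option.some_inj.mp this).symm
    rw [hjj, pvLeftB_succ_def, hgd, if_neg hd]
    omega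
  | case3 i h1 hg =>
    intro h0 hlt
    exact absurd (PySem.List.pyGet?_eq_some_getElem (xs := cs) (i := i - 1) (by omega) (by omega))
      (by rw [hg]; simp)
  | case4 i h1 =>
    intro h0 hlt
    rw [pvLeftA, dif_neg h1]
    have : i = 0 := by omega
    subst this
    simp [pvLeftB]

theorem pvFwdA_eq (cs : List Char) : ∀ (i : Int) (acc : List Char), 0 ≤ i →
    pvFwdA cs i acc = acc ++ (cs.drop i.toNat).takeWhile PySem.Chars.isdigit := by
  intro i acc
  induction i, acc using pvFwdA.induct cs with
  | case1 i acc hlt c hg hd ih =>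
    intro h0
    rw [pvFwdA, dif_pos hlt, hg]
    show (if PySem.Chars.isdigit c = true then pvFwdA cs (i + 1) (acc ++ [c]) else acc) = _
    rw [if_pos hd, ih (by omega)]
    have hc : c = cs[i.toNat] := by
      have := PySem.List.pyGet?_eq_some_getElem (xs := cs) (i := i) h0 hlt
      rw [hg] at this
      exact Option.some_inj.mp this
    have hdrop : cs.drop i.toNat = cs[i.toNat] :: cs.drop (i.toNat + 1) :=
      List.drop_eq_getElem_cons (by omega)
    have hi1 : (i + 1).toNat = i.toNat + 1 := by omega
    rw [hi1, hdrop, List.takeWhile_cons, ← hc, if_pos hd]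
    simp
  | case2 i acc hlt c hg hd =>
    intro h0
    rw [pvFwdA, dif_pos hlt, hg]
    show (if PySem.Chars.isdigit c = true then pvFwdA cs (i + 1) (acc ++ [c]) else acc) = _
    rw [if_neg hd]
    have hc : c = cs[i.toNat] := by
      have := PySem.List.pyGet?_eq_some_getElem (xs := cs) (i := i) h0 hlt
      rw [hg] at this
      exact Option.some_inj.mp this
    have hdrop : cs.drop i.toNat = cs[i.toNat] :: cs.drop (i.toNat + 1) :=
      List.drop_eq_getElem_cons (by omega)
    rw [hdrop, List.takeWhile_cons, ← hc, if_neg hd]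
    simp
  | case3 i acc hlt hg =>
    intro h0
    exact absurd (PySem.List.pyGet?_eq_some_getElem (xs := cs) (i := i) h0 hlt)
      (by rw [hg]; simp)
  | case4 i acc hlt =>
    intro h0
    rw [pvFwdA, dif_neg hlt]
    rw [List.drop_eq_nil_of_le (by omega)]
    simp

-- ===== VERDICT (by name: the statement is the Claim_ definition above) =====
theorem get_whole_number_spec : Claim_unchanged_get_whole_number := by
  intro s start_i _hdom hpre hnd
  obtain ⟨hge, hlt⟩ := hpre
  unfold get_whole_number get_whole_number_alt
  simp only [PySem.Str.pyGet?_eq, PySem.Chars.pyGet?_eq_listPyGet?]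
  by_cases hneg : start_i < 0
  · -- negative in-range index: ¬D says the addressed character is not a digit, both sides give none
    rw [if_pos hneg]
    have h0len : 0 ≤ start_i + (s.toList.length : Int) := by omega
    have hndig : PySem.Chars.isdigit
        (s.toList.getD (start_i + (s.toList.length : Int)).toNat ' ') = false := by
      cases h : PySem.Chars.isdigit
          (s.toList.getD (start_i + (s.toList.length : Int)).toNat ' ') with
      | false => rfl
      | true =>
        refine absurd ⟨hneg, h0len, ?_⟩ hnd
        rw [pvD_digit_bridge _ _ (by omega), h]
    rw [if_pos ⟨h0len, by omega⟩, if_pos (by rw [hndig]; simp)]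
    obtain ⟨k0, hk0, hk1, hk2⟩ : ∃ k0 : ℕ, start_i = -(k0 : Int) ∧ 1 ≤ k0 ∧ k0 ≤ s.toList.length :=
      ⟨(-start_i).toNat, by omega, by omega, by omega⟩
    have hidx : s.toList.length - k0 < s.toList.length := by omega
    have hg : PySem.List.pyGet? s.toList start_i = s.toList[s.toList.length - k0]? := by
      rw [hk0]
      exact PySem.List.pyGet?_neg_natCast s.toList k0 (by omega) (by omega)
    have hgd : s.toList.getD (start_i + (s.toList.length : Int)).toNat ' '
        = s.toList[s.toList.length - k0] := by
      rw [List.getD_eq_getElem (hn := by omega)]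
      congr 1
      omega
    rw [hgd] at hndig
    rw [hg, List.getElem?_eq_getElem hidx]
    show (if PySem.Chars.isdigit (s.toList[s.toList.length - k0]'hidx) = true
        then _ else none) = none
    rw [hndig]
    simp
  · -- non-negative index
    rw [if_neg hneg]
    have h0 : 0 ≤ start_i := by omega
    have hlt' : start_i.toNat < s.toList.length := by omega
    rw [if_pos ⟨h0, hlt⟩]
    have hg : PySem.List.pyGet? s.toList start_i = some (s.toList[start_i.toNat]'hlt') :=
      PySem.List.pyGet?_eq_some_getElem s.toList (i := start_i) h0 hlt
    rw [hg]
    have hgd : s.toList.getD start_i.toNat ' ' = s.toList[start_i.toNat]'hlt' := by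
      rw [List.getD_eq_getElem (hn := hlt')]
    by_cases hd : PySem.Chars.isdigit (s.toList[start_i.toNat]'hlt') = true
    · show (if PySem.Chars.isdigit (s.toList[start_i.toNat]'hlt') = true then _ else none) = _
      rw [if_pos hd, if_neg (by rw [hgd, hd]; simp), pvScanB_eq]
      rw [if_pos ⟨h0, by omega, by
        rw [show (start_i - 0).toNat = start_i.toNat by omega, hgd]; exact hd⟩]
      have hleft : pvLeftA s.toList start_i = (pvLeftB s.toList start_i.toNat : Int) :=
        pvLeftA_eq s.toList start_i h0 hlt
      have hfwd : pvFwdA s.toList (pvLeftA s.toList start_i) []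
          = pvRunOf s.toList (start_i.toNat) := by
        rw [hleft, pvFwdA_eq s.toList _ [] (by positivity)]
        unfold pvRunOf
        simp
      rw [hfwd, hleft]
      rw [show (start_i - 0).toNat = start_i.toNat by omega, zero_add]
    · show (if PySem.Chars.isdigit (s.toList[start_i.toNat]'hlt') = true then _ else none) = _
      rw [if_neg hd, if_pos (by rw [hgd]; simpa using hd)]

theorem get_whole_number_changed : Claim_changed_get_whole_number := by
  unfold Claim_changed_get_whole_number
  refine ⟨by decide, by decide, by decide, ?_, ?_, by decide⟩
  · show get_whole_number "12" (-1) = some (212, -1)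
    simp [get_whole_number, pvLeftA, pvFwdA, PySem.Chars.isdigit, PySem.List.pyGet?]
    decide
  · show get_whole_number_alt "12" (-1) = some (12, 0)
    simp [get_whole_number_alt, pvScanB, PySem.Chars.isdigit]
    decide

theorem get_whole_number_tight : Claim_exact_get_whole_number := by
  intro s start_i _hdom hpre hd
  obtain ⟨hge, hlt⟩ := hpre
  obtain ⟨hneg, h0len, hany⟩ := hd
  have hj : (start_i + (s.toList.length : Int)).toNat < s.toList.length := by omega
  have hdig : PySem.Chars.isdigit
      (s.toList.getD (start_i + (s.toList.length : Int)).toNat ' ') = true := by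
    rw [← pvD_digit_bridge _ _ hj]
    exact hany
  unfold get_whole_number get_whole_number_alt
  simp only [PySem.Str.pyGet?_eq, PySem.Chars.pyGet?_eq_listPyGet?]
  obtain ⟨k0, hk0, hk1, hk2⟩ : ∃ k0 : ℕ, start_i = -(k0 : Int) ∧ 1 ≤ k0 ∧ k0 ≤ s.toList.length :=
    ⟨(-start_i).toNat, by omega, by omega, by omega⟩
  have hidx : s.toList.length - k0 < s.toList.length := by omega
  have hg : PySem.List.pyGet? s.toList start_i = s.toList[s.toList.length - k0]? := by
    rw [hk0]
    exact PySem.List.pyGet?_neg_natCast s.toList k0 (by omega) (by omega)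
  have hgd : s.toList.getD (start_i + (s.toList.length : Int)).toNat ' '
      = s.toList[s.toList.length - k0] := by
    rw [List.getD_eq_getElem (hn := by omega)]
    congr 1
    omega
  rw [hgd] at hdig
  rw [hg, List.getElem?_eq_getElem hidx]
  show (if PySem.Chars.isdigit (s.toList[s.toList.length - k0]'hidx) = true
      then some (pvIntVal (pvFwdA s.toList (pvLeftA s.toList start_i) []),
        pvLeftA s.toList start_i) else none) ≠ _
  rw [if_pos hdig, if_pos hneg, if_pos ⟨h0len, by omega⟩,
    if_neg (by rw [← hgd] at hdig; rw [hdig]; simp), pvScanB_eq]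
  rw [if_pos ⟨h0len, by omega, by
    rw [show (start_i + (s.toList.length : Int) - 0).toNat
      = (start_i + (s.toList.length : Int)).toNat by omega, hgd]; exact hdig⟩]
  have hla : pvLeftA s.toList start_i = start_i := by
    rw [pvLeftA, dif_neg (by omega : ¬ (1:Int) ≤ start_i)]
  rw [hla]
  intro h
  have h2 := (Prod.mk.injEq _ _ _ _).mp (Option.some.inj h)
  omega
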